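-- pv_equiv track=rewrite | github.com/giovannitarter/adventofcode | 2023/python/07/sol.py | countj
-- ===== SOURCE A (Python) =====
-- def countj(hand):
--
--     res = {}
--     for c in hand:
--         tmp = res.get(c, 0)
--         tmp += 1
--         res[c] = tmp
--
--     if "J" in res and res["J"] != 5:
--         j_nr = res.pop("J")
--         max_s, max_count = sorted(res.items(), key=lambda x: x[1])[-1]
--         res[max_s] = max_count + j_nr
--
--     return res
-- ===== SOURCE B (Python) =====
-- def countj(hand):
--     # Dict-free reconstruction: distinct cards in first-occurrence order,
--     # counts via hand.count, joker merged into the last-maximal other card.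
--     order = []
--     for c in hand:
--         if c not in order:
--             order.append(c)
--     jn = hand.count("J")
--     if jn == 0 or jn == 5:
--         return {c: hand.count(c) for c in order}
--     others = [c for c in order if c != "J"]
--     best = others[0]
--     for c in others:
--         if hand.count(c) >= hand.count(best):
--             best = c
--     return {c: hand.count(c) + (jn if c == best else 0) for c in others}
-- ===== Notes on version B (the rewrite author's own statement) =====
-- stated objective: alternative
-- what changed: B builds no mutable counter dict at all: it collects distinct cards in first-occurrence order, gets each count via hand.count, picks the joker target by a single last-max linear scan over the non-J cards (>= so later ties win, matching A's stable sort-then-last), and constructs the result mapping directly, instead of A's incremental dict counting, dict.pop and sort of the items.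
import Mathlib
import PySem

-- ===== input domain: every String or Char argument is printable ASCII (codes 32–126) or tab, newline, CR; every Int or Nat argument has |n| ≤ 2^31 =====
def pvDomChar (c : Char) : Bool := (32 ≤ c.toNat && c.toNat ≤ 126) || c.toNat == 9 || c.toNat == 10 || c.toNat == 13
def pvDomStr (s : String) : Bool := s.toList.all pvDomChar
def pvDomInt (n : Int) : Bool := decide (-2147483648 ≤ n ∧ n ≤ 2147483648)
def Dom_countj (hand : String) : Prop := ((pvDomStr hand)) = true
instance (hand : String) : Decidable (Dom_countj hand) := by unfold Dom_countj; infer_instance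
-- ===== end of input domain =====

-- B drops A's mutable counter dict entirely: distinct cards in first-occurrence order, per-card
-- counts via count, a linear last-max scan instead of sort-then-last, result built directly (alternative).


-- ===== PORT A =====
def countj (hand : String) : List (String × Int) :=
  let cs := hand.toList
  let res := cs.foldl (fun d c => d.insert c (d.getD c 0 + 1)) (PySem.Dict.empty : PySem.Dict Char Int)
  let res2 :=
    if res.contains 'J' ∧ res.getD 'J' 0 ≠ 5 then
      match res.pop? 'J' with
      | some (jNr, res') =>
        match PySem.List.pyGet? (PySem.List.sorted res'.items (fun p => p.2)) (-1) with
        | some (maxS, maxC) => res'.insert maxS (maxC + jNr)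
        | none => res'          -- Python raises IndexError here; excluded by Pre_countj
      | none => res             -- unreachable: the guard ensures the key is present
    else res
  res2.items.map (fun p => (p.1.toString, p.2))

-- ===== PORT B =====
def countj_alt (hand : String) : List (String × Int) :=
  let cs := hand.toList
  let order := cs.foldl (fun acc c => if c ∈ acc then acc else acc ++ [c]) []
  let jn := cs.count 'J'
  if jn = 0 ∨ jn = 5 then
    order.map (fun c => (c.toString, (cs.count c : Int)))
  else
    match order.filter (fun c => ¬ c = 'J') with
    | [] => []                  -- Python raises IndexError (others[0]); excluded by Pre_countj
    | b0 :: t =>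
      let others := b0 :: t
      let best := others.foldl (fun b c => if cs.count c ≥ cs.count b then c else b) b0
      others.map (fun c => (c.toString, (cs.count c : Int) + (if c = best then (jn : Int) else 0)))

-- ===== PRECONDITION & SPEC =====
-- Pre_ excludes only hands made of jokers alone with length ∉ {0, 5} ("J", "JJ", …): there the
-- Python A raises IndexError (sorted([])[-1] after popping "J"), so A returns no value at all.
def Pre_countj (hand : String) : Prop :=
  hand.toList.all (· == 'J') = true → (hand.toList = [] ∨ hand.toList.length = 5)
instance (hand : String) : Decidable (Pre_countj hand) := by unfold Pre_countj; infer_instance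
def pvWitness_countj : String := "32TJK"
def Spec_countj (hand : String) (out : List (String × Int)) : Prop := out = countj_alt hand
instance (hand : String) (out : List (String × Int)) : Decidable (Spec_countj hand out) := by unfold Spec_countj; infer_instance

-- ===== CLAIM =====
def Claim_equal_countj : Prop := ∀ (hand : String), Dom_countj hand → Pre_countj hand → Spec_countj hand (countj hand)

-- ===== LEMMAS AND PROOFS =====

-- the last-max scan stays inside its candidates
theorem scanK_mem (cnt : Char → Nat) :
    ∀ (l : List Char) (b : Char),
      l.foldl (fun b c => if cnt c ≥ cnt b then c else b) b ∈ b :: l := by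
  intro l
  induction l with
  | nil => intro b; simp
  | cons c t ih =>
    intro b
    simp only [List.foldl_cons]
    by_cases h : cnt c ≥ cnt b
    · rw [if_pos h]
      exact List.mem_cons_of_mem b (ih c)
    · rw [if_neg h]
      rcases List.mem_cons.mp (ih b) with h1 | h1
      · simp [h1]
      · exact List.mem_cons_of_mem _ (List.mem_cons_of_mem _ h1)

-- the pair fold over mapped pairs is the key fold
theorem scan_pairs_eq_key (cnt : Char → Nat) :
    ∀ (l : List Char) (b : Char),
      (l.map (fun c => (c, (cnt c : Int)))).foldl
          (fun (x : Char × Int) p => if p.2 ≥ x.2 then p else x) (b, (cnt b : Int))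
        = (l.foldl (fun b c => if cnt c ≥ cnt b then c else b) b,
           (cnt (l.foldl (fun b c => if cnt c ≥ cnt b then c else b) b) : Int)) := by
  intro l
  induction l with
  | nil => intro b; rfl
  | cons c t ih =>
    intro b
    simp only [List.map_cons, List.foldl_cons]
    by_cases h : cnt c ≥ cnt b
    · have h' : ((cnt c : Int) ≥ (cnt b : Int)) := by exact_mod_cast h
      rw [if_pos h', if_pos h, ih]
    · have h' : ¬ ((cnt c : Int) ≥ (cnt b : Int)) := by exact_mod_cast h
      rw [if_neg h', if_neg h, ih]

theorem pairwise_le_getLast? {α : Type} (f : α → Int) :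
    ∀ (s : List α), s.Pairwise (fun a b => f a ≤ f b) →
      ∀ q, s.getLast? = some q → ∀ y ∈ s, f y ≤ f q := by
  intro s
  induction s with
  | nil => intro _ q hq; simp at hq
  | cons a t ih =>
    intro hp q hq y hy
    rcases List.pairwise_cons.mp hp with ⟨ha, hpt⟩
    cases t with
    | nil =>
      simp at hq hy; subst hq; subst hy; exact le_refl _
    | cons b u =>
      have hq' : (b :: u).getLast? = some q := by
        simpa [List.getLast?_cons_cons] using hq
      rcases List.mem_cons.mp hy with hya | hyt
      · subst hya
        exact ha q (List.mem_of_getLast? hq')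
      · exact ih hpt q hq' y hyt

theorem insertBy_ne_nil {α : Type} (before : α → α → Bool) (x : α) (ys : List α) :
    PySem.List.insertBy before x ys ≠ [] := by
  cases ys with
  | nil => simp [PySem.List.insertBy]
  | cons y t => simp only [PySem.List.insertBy]; split <;> simp

theorem insertBy_getLast?_of_lt {α : Type} (f : α → Int) (p : α) :
    ∀ (s : List α), s.Pairwise (fun a b => f a ≤ f b) →
      ∀ q, s.getLast? = some q → f p < f q →
      (PySem.List.insertBy (fun a b => decide (f a < f b)) p s).getLast? = some q := by
  intro s
  induction s with
  | nil => intro _ q hq; simp at hq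
  | cons y t ih =>
    intro hp q hq hlt
    rcases List.pairwise_cons.mp hp with ⟨hy, hpt⟩
    by_cases hb : f p < f y
    · simp only [PySem.List.insertBy, hb, decide_true, if_true]
      simpa [List.getLast?_cons_cons] using hq
    · simp only [PySem.List.insertBy, hb, decide_false]
      cases t with
      | nil =>
        simp at hq; subst hq; exact absurd hlt hb
      | cons b u =>
        have hq' : (b :: u).getLast? = some q := by
          simpa [List.getLast?_cons_cons] using hq
        have hrec := ih hpt q hq' hlt
        cases h : PySem.List.insertBy (fun a b => decide (f a < f b)) p (b :: u) with
        | nil => exact absurd h (insertBy_ne_nil _ _ _)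
        | cons z w =>
          rw [h] at hrec
          simp [List.getLast?_cons_cons, hrec]

theorem insertBy_getLast?_of_ge {α : Type} (f : α → Int) (p : α)
    (s : List α) (hp : s.Pairwise (fun a b => f a ≤ f b))
    (q : α) (hq : s.getLast? = some q) (hge : f q ≤ f p) :
    (PySem.List.insertBy (fun a b => decide (f a < f b)) p s).getLast? = some p := by
  have hall : ∀ y ∈ s, (fun a b => decide (f a < f b)) p y = false := by
    intro y hy
    have := pairwise_le_getLast? f s hp q hq y hy
    simp; omega
  rw [PySem.List.insertBy_of_forall_not_before _ _ _ hall]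
  simp

-- last element of the stable ascending sort = last-max linear scan started at the head
theorem sortedLast_eq_scan {α : Type} (f : α → Int) :
    ∀ (l : List α) (b0 : α),
      (PySem.List.sorted (b0 :: l) (fun p => f p)).getLast?
        = some ((b0 :: l).foldl (fun b p => if f p ≥ f b then p else b) b0) := by
  intro l
  induction l using List.reverseRecOn with
  | nil =>
    intro b0
    simp [PySem.List.sorted_eq_foldl_insertBy, PySem.List.insertBy]
  | append_singleton l p ih =>
    intro b0
    have hsort : PySem.List.sorted (b0 :: (l ++ [p])) (fun x => f x)
        = PySem.List.insertBy (fun a b => decide (f a < f b)) p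
            (PySem.List.sorted (b0 :: l) (fun x => f x)) := by
      rw [PySem.List.sorted_eq_foldl_insertBy, PySem.List.sorted_eq_foldl_insertBy]
      simp [List.foldl_append]
    have hq := ih b0
    set q := (b0 :: l).foldl (fun b x => if f x ≥ f b then x else b) b0 with hqdef
    have hpw : (PySem.List.sorted (b0 :: l) (fun x => f x)).Pairwise (fun a b => f a ≤ f b) :=
      PySem.List.sorted_pairwise _ _
    have hfoldr : (b0 :: (l ++ [p])).foldl (fun b x => if f x ≥ f b then x else b) b0
        = if f p ≥ f q then p else q := by
      have : (b0 :: (l ++ [p])) = (b0 :: l) ++ [p] := by simp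
      rw [this, List.foldl_append]
      simp [← hqdef]
    rw [hsort, hfoldr]
    by_cases h : f p ≥ f q
    · rw [if_pos h]
      exact insertBy_getLast?_of_ge f p _ hpw q hq h
    · rw [if_neg h]
      exact insertBy_getLast?_of_lt f p _ hpw q hq (not_le.mp h)

-- ===== VERDICT helper chain ================================================

theorem countj_spec_aux (hand : String) (hpre : Pre_countj hand) :
    countj hand = countj_alt hand := by
  unfold countj countj_alt
  simp only [PySem.Dict.foldl_insert_getD_add_one_eq_counter]
  set cs := hand.toList with hcs
  have horder : cs.foldl (fun acc c => if c ∈ acc then acc else acc ++ [c]) []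
      = PySem.Set.ofList cs := by
    rw [PySem.Set.ofList]
    induction cs using List.reverseRecOn with
    | nil => rfl
    | append_singleton l c ih =>
      rw [List.foldl_append, List.foldl_append, ih]
      simp [PySem.Set.add, PySem.Set.contains, List.foldl]
  rw [horder]
  have hguard : ((PySem.Dict.counter cs).contains 'J' ∧ (PySem.Dict.counter cs).getD 'J' 0 ≠ 5)
      ↔ ¬ (cs.count 'J' = 0 ∨ cs.count 'J' = 5) := by
    rw [PySem.Dict.contains_counter, PySem.Dict.getD_counter]
    constructor
    · rintro ⟨h1, h2⟩ (h0 | h5)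
      · rw [List.contains_iff_mem] at h1
        exact absurd (List.count_pos_iff.mpr h1) (by omega)
      · exact h2 (by exact_mod_cast h5)
    · intro h
      have h0 : cs.count 'J' ≠ 0 := fun hh => h (Or.inl hh)
      have h5 : cs.count 'J' ≠ 5 := fun hh => h (Or.inr hh)
      refine ⟨?_, ?_⟩
      · rw [List.contains_iff_mem]
        exact List.count_pos_iff.mp (by omega)
      · intro hc
        exact h5 (by exact_mod_cast hc)
  by_cases hg : cs.count 'J' = 0 ∨ cs.count 'J' = 5
  · rw [if_neg (fun hc => (hguard.mp hc) hg), if_pos hg]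
    rw [PySem.Dict.items_counter]
    simp [List.map_map, Function.comp]
  · rw [if_pos (hguard.mpr hg), if_neg hg]
    -- the pop succeeds and leaves the counter with 'J' erased
    have hcont : (PySem.Dict.counter cs).contains 'J' := by
      rw [PySem.Dict.contains_counter, List.contains_iff_mem]
      exact List.count_pos_iff.mp (by omega)
    cases hpop : (PySem.Dict.counter cs).pop? 'J' with
    | none =>
      exfalso
      simp only [PySem.Dict.pop?] at hpop
      rw [Option.map_eq_none_iff] at hpop
      rw [PySem.Dict.contains_eq_isSome_get?, hpop] at hcont
      simp at hcont
    | some pr =>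
      obtain ⟨jNr, E⟩ := pr
      have hjnr : jNr = (cs.count 'J' : Int) := by
        simp only [PySem.Dict.pop?] at hpop
        rcases Option.map_eq_some_iff.mp hpop with ⟨v, hv, heq⟩
        have : jNr = v := (congrArg Prod.fst heq).symm
        have hv' : (PySem.Dict.counter cs).getD 'J' 0 = v := PySem.Dict.getD_of_get?_eq_some _ _ hv
        rw [PySem.Dict.getD_counter] at hv'
        omega
      have hE : E = (PySem.Dict.counter cs).erase 'J' := by
        simp only [PySem.Dict.pop?] at hpop
        rcases Option.map_eq_some_iff.mp hpop with ⟨v, hv, heq⟩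
        exact (congrArg Prod.snd heq).symm
      -- E's items are the non-J distinct cards paired with their counts
      have hEitems : E.items
          = ((PySem.Set.ofList cs).filter (fun c => ¬ c = 'J')).map
              (fun c => (c, (cs.count c : Int))) := by
        rw [hE]
        show ((PySem.Dict.counter cs).items.filter _) = _
        rw [PySem.Dict.items_counter, List.filter_map]
        congr 1
        exact List.filter_congr (by intro c _; by_cases h : c = 'J' <;> simp [h, Function.comp])
      -- the filtered list is nonempty, by Pre_
      cases hoth : (PySem.Set.ofList cs).filter (fun c => ¬ c = 'J') with
      | nil =>
        exfalso
        have hallJ : ∀ c ∈ cs, c = 'J' := by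
          intro c hc
          by_contra hne
          have hmem : c ∈ (PySem.Set.ofList cs).filter (fun c => ¬ c = 'J') := by
            rw [List.mem_filter]
            exact ⟨(PySem.Set.mem_ofList cs c).mpr hc, by simp [hne]⟩
          rw [hoth] at hmem; simp at hmem
        have hall : cs.all (· == 'J') = true := by
          rw [List.all_eq_true]; intro c hc; simpa using hallJ c hc
        rcases hpre hall with hnil | hlen
        · rw [← hcs] at hnil
          rw [hnil] at hg
          simp at hg
        · have : cs.count 'J' = cs.length := by
            rw [List.count_eq_length]
            intro b hb; exact (hallJ b hb).symm
          rw [← hcs] at hlen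
          omega
      | cons b0 t =>
        -- name the count function and both scans
        have hpos_count : ∀ c ∈ b0 :: t, cs.count c ≠ 0 := by
          intro c hc
          have : c ∈ PySem.Set.ofList cs := by
            have := hoth ▸ hc
            exact (List.mem_filter.mp (hoth ▸ hc : c ∈ _)).1
          have hmem : c ∈ cs := (PySem.Set.mem_ofList cs c).mp this
          have := List.count_pos_iff.mpr hmem
          omega
        dsimp only
        rw [hEitems, hoth]
        set best := (b0 :: t).foldl (fun b c => if cs.count c ≥ cs.count b then c else b) b0
          with hbest
        have hscan := scan_pairs_eq_key (fun c => cs.count c) t b0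
        have hlast := sortedLast_eq_scan (fun p : Char × Int => p.2)
          (t.map (fun c => (c, (cs.count c : Int)))) (b0, (cs.count b0 : Int))
        have hmapcons : (b0 :: t).map (fun c => (c, (cs.count c : Int)))
            = (b0, (cs.count b0 : Int)) :: t.map (fun c => (c, (cs.count c : Int))) := rfl
        rw [hmapcons, PySem.List.pyGet?_neg_one, hlast]
        have hfold_eq : ((b0, (cs.count b0 : Int)) :: t.map (fun c => (c, (cs.count c : Int)))).foldl
            (fun (b : Char × Int) p => if p.2 ≥ b.2 then p else b) (b0, (cs.count b0 : Int))
            = (best, (cs.count best : Int)) := by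
          rw [List.foldl_cons]
          have hb0 : (if ((cs.count b0 : Int) ≥ (cs.count b0 : Int)) then
              (b0, (cs.count b0 : Int)) else (b0, (cs.count b0 : Int))) = (b0, (cs.count b0 : Int)) := by
            simp
          rw [hb0, hscan]
          rw [hbest]
          rw [List.foldl_cons]
          simp
        rw [hfold_eq]
        -- A now inserts at best, an existing key of E
        have hbest_mem : best ∈ b0 :: t := by
          have := scanK_mem (fun c => cs.count c) t b0
          rw [hbest, List.foldl_cons]
          simp only [ge_iff_le, le_refl, if_pos] at *
          exact this
        have hcontE : E.contains best = true := by
          rw [PySem.Dict.contains_iff_mem_keys]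
          show best ∈ E.items.map Prod.fst
          rw [hEitems, hoth, List.map_map]
          simpa [Function.comp] using hbest_mem
        show (E.insert best _).items.map _ = _
        rw [PySem.Dict.items_insert, if_pos hcontE, hEitems, hoth]
        rw [List.map_map, List.map_map]
        apply List.map_congr_left
        intro c _
        by_cases hcb : c = best
        · subst hcb
          simp [hjnr]
        · have : (c == best) = false := by simp [hcb]
          simp [Function.comp, this, hcb]

-- ===== VERDICT =====
theorem countj_spec : Claim_equal_countj := by
  intro hand _ hpre
  unfold Spec_countj
  exact countj_spec_aux hand hpre
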